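-- pv_equiv track=rewrite | github.com/MegaGiciorPortas/WDI-Zadania | 05-rekurencja/5.179.py | rekurencja
-- ===== SOURCE A (Python) =====
-- def isPrime(n):
--     if n <= 1:
--         return False
--     if n <= 3:
--         return True
--     if n % 2 == 0 or n % 3 == 0:
--         return False
--     i = 5
--     while i * i <= n:
--         if n % i == 0 or n % (i + 2) == 0:
--             return False
--         i += 6
--     return True
--
-- def rekurencja(T, indeks = 0, current = 0, piecies = 0):
--     if indeks >= len(T):
--         if current == 0:
--             return isPrime(piecies)
--         if isPrime(current):
--             return isPrime(piecies + 1)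
--         return False
--
--     current = current * 10 + T[indeks]
--
--     if isPrime(current):
--         return rekurencja(T,indeks+1, 0, piecies+1) or rekurencja(T, indeks + 1, current, piecies)
--     else:
--         return rekurencja(T, indeks + 1, current, piecies)
-- ===== SOURCE B (Python) =====
-- def isPrime(n):
--     if n <= 1:
--         return False
--     if n <= 3:
--         return True
--     if n % 2 == 0 or n % 3 == 0:
--         return False
--     i = 5
--     while i * i <= n:
--         if n % i == 0 or n % (i + 2) == 0:
--             return False
--         i += 6
--     return True
--
-- def rekurencja(T, indeks=0, current=0, piecies=0):
--     # DP over a deduplicated set of reachable (current, piecies) states,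
--     # built in one pass over the indices instead of branching recursion.
--     states = {(current, piecies)}
--     for i in range(indeks, len(T)):
--         d = T[i]
--         new = set()
--         for (cur, p) in states:
--             c2 = cur * 10 + d
--             if isPrime(c2):
--                 new.add((0, p + 1))
--             new.add((c2, p))
--         states = new
--     return any(isPrime(p) if cur == 0 else (isPrime(cur) and isPrime(p + 1))
--                for (cur, p) in states)
-- ===== Notes on version B (the rewrite author's own statement) =====
-- stated objective: alternative
-- what changed: Replaced A's branching recursion over segment cut-points by a single left-to-right pass that maintains the deduplicated set of reachable (current, piecies) states and tests the terminal condition on each final state.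
import Mathlib
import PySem

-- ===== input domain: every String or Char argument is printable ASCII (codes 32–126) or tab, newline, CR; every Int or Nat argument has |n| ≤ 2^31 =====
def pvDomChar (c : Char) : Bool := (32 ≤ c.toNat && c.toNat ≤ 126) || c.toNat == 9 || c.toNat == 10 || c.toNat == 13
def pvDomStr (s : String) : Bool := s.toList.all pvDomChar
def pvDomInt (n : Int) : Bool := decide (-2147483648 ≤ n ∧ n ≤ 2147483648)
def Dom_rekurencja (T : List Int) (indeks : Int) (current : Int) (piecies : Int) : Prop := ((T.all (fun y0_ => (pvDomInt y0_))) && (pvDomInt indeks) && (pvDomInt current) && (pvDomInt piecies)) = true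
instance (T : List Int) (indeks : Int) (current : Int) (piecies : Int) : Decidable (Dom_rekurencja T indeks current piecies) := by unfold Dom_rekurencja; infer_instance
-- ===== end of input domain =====

-- B replaces A's branching recursion over segment cut-points by a single left-to-right pass
-- over the indices maintaining the deduplicated set of reachable (current, piecies) states
-- (objective: alternative).

-- ===== PORT A =====
-- shared helper isPrime (identical in Source A and Source B); the Python while loop runs at most
-- n.toNat iterations (i*i ≤ n with i ≥ 5 stepping by 6), so the fuel never runs out.
def isPrimeAux (n : Int) : Nat → Int → Bool
  | 0, _ => true
  | fuel + 1, i =>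
    if i * i ≤ n then
      if PySem.Int.mod n i == 0 || PySem.Int.mod n (i + 2) == 0 then false
      else isPrimeAux n fuel (i + 6)
    else true

def isPrime (n : Int) : Bool :=
  if n ≤ 1 then false
  else if n ≤ 3 then true
  else if PySem.Int.mod n 2 == 0 || PySem.Int.mod n 3 == 0 then false
  else isPrimeAux n n.toNat 5

def rekurencja (T : List Int) (indeks : Int) (current : Int) (piecies : Int) : Bool :=
  if indeks ≥ (T.length : Int) then
    if current == 0 then isPrime piecies
    else if isPrime current then isPrime (piecies + 1)
    else false
  else
    match PySem.List.pyGet? T indeks with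
    | none => false   -- Python raises IndexError here; excluded by Pre_rekurencja
    | some d =>
      let current := current * 10 + d
      if isPrime current then
        rekurencja T (indeks + 1) 0 (piecies + 1) || rekurencja T (indeks + 1) current piecies
      else
        rekurencja T (indeks + 1) current piecies
termination_by ((T.length : Int) - indeks).toNat
decreasing_by all_goals omega

-- ===== PORT B =====
-- body of B's inner loop: add the successors of state s under digit d
def stepState (d : Int) (acc : PySem.Set (Int × Int)) (s : Int × Int) : PySem.Set (Int × Int) :=
  let c2 := s.1 * 10 + d
  let acc := if isPrime c2 then PySem.Set.add acc (0, s.2 + 1) else acc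
  PySem.Set.add acc (c2, s.2)

-- one iteration of B's outer loop over index i
def stepAll (T : List Int) (states : PySem.Set (Int × Int)) (i : Int) : PySem.Set (Int × Int) :=
  let d := PySem.List.pyGetD T i 0   -- T[i]; in range under Pre_rekurencja
  states.foldl (stepState d) PySem.Set.empty

-- B's terminal test on one state
def finalOk (s : Int × Int) : Bool :=
  if s.1 == 0 then isPrime s.2 else (isPrime s.1 && isPrime (s.2 + 1))

def rekurencja_alt (T : List Int) (indeks : Int) (current : Int) (piecies : Int) : Bool :=
  let states := (PySem.List.pyRange indeks (T.length : Int) 1).foldl (stepAll T)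
    (PySem.Set.ofList [(current, piecies)])
  states.any finalOk

-- ===== PRECONDITION & SPEC =====
-- Pre_ excludes exactly the inputs where Python's T[indeks] raises IndexError (indeks < -len(T)).
def Pre_rekurencja (T : List Int) (indeks : Int) (current : Int) (piecies : Int) : Prop :=
  -(T.length : Int) ≤ indeks
instance (T : List Int) (indeks : Int) (current : Int) (piecies : Int) : Decidable (Pre_rekurencja T indeks current piecies) := by unfold Pre_rekurencja; infer_instance

def pvWitness_rekurencja : List Int × Int × Int × Int := ([2, 3, 3], 0, 0, 0)

def Spec_rekurencja (T : List Int) (indeks : Int) (current : Int) (piecies : Int) (out : Bool) : Prop := out = rekurencja_alt T indeks current piecies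
instance (T : List Int) (indeks : Int) (current : Int) (piecies : Int) (out : Bool) : Decidable (Spec_rekurencja T indeks current piecies out) := by unfold Spec_rekurencja; infer_instance

-- ===== CLAIM (what is proved, stated in full; the proofs are below) =====
def Claim_equal_rekurencja : Prop := ∀ (T : List Int) (indeks : Int) (current : Int) (piecies : Int), Dom_rekurencja T indeks current piecies → Pre_rekurencja T indeks current piecies → Spec_rekurencja T indeks current piecies (rekurencja T indeks current piecies)

-- ===== LEMMAS AND PROOFS =====

-- membership in B's inner fold over the state set
lemma mem_foldl_stepState (d : Int) (S acc0 : List (Int × Int)) (y : Int × Int) :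
    y ∈ S.foldl (stepState d) acc0 ↔
      y ∈ acc0 ∨ ∃ s ∈ S, (isPrime (s.1 * 10 + d) = true ∧ y = (0, s.2 + 1)) ∨ y = (s.1 * 10 + d, s.2) := by
  induction S generalizing acc0 with
  | nil => simp
  | cons s S ih =>
    simp only [List.foldl_cons, ih, stepState]
    by_cases hp : isPrime (s.1 * 10 + d) = true
    · simp only [hp, if_true, PySem.Set.mem_add, List.mem_cons]
      aesop
    · simp only [hp, PySem.Set.mem_add, List.mem_cons]
      aesop

-- base case: A's terminal test agrees with B's finalOk
lemma rekurencja_base (T : List Int) (indeks current piecies : Int)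
    (h : indeks ≥ (T.length : Int)) :
    rekurencja T indeks current piecies = finalOk (current, piecies) := by
  rw [rekurencja]
  simp only [h, if_pos, finalOk]
  by_cases h0 : current == 0
  · simp [h0]
  · by_cases hp : isPrime current = true <;> simp [h0, hp]

-- main invariant: running B's loop from index `indeks` on a state set S and testing finalOk
-- equals "some state in S is accepted by A's recursion from indeks"
lemma main_inv (T : List Int) (indeks : Int) (h : -(T.length : Int) ≤ indeks)
    (S : List (Int × Int)) :
    ((PySem.List.pyRange indeks (T.length : Int) 1).foldl (stepAll T) S).any finalOk
      = S.any (fun s => rekurencja T indeks s.1 s.2) := by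
  by_cases hge : indeks ≥ (T.length : Int)
  · rw [PySem.List.pyRange_one_eq_nil hge]
    simp only [List.foldl_nil]
    have hf : (fun s : Int × Int => rekurencja T indeks s.1 s.2) = finalOk :=
      funext fun s => rekurencja_base T indeks s.1 s.2 hge
    rw [hf]
  · have hlt : indeks < (T.length : Int) := by omega
    rw [PySem.List.pyRange_one_cons hlt]
    simp only [List.foldl_cons]
    rw [main_inv T (indeks + 1) (by omega)]
    -- T[indeks] exists and is what pyGetD reads
    obtain ⟨d, hd⟩ : ∃ d, PySem.List.pyGet? T indeks = some d := by
      cases h' : PySem.List.pyGet? T indeks with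
      | none =>
        rw [PySem.List.pyGet?_eq_none_iff] at h'
        exact absurd (by unfold PySem.Raise.InRange; omega) h'
      | some d => exact ⟨d, rfl⟩
    have hgetD : PySem.List.pyGetD T indeks 0 = d := by
      simp [PySem.List.pyGetD, hd]
    rw [Bool.eq_iff_iff, List.any_eq_true, List.any_eq_true]
    simp only [stepAll, hgetD]
    constructor
    · rintro ⟨y, hy, hfy⟩
      rw [mem_foldl_stepState] at hy
      rcases hy with h0 | ⟨s, hs, hcase⟩
      · simp [PySem.Set.empty] at h0
      · refine ⟨s, hs, ?_⟩
        rw [rekurencja]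
        simp only [hge, hd]
        rcases hcase with ⟨hp, rfl⟩ | rfl
        · simp_all
        · split
          · simp_all
          · simp_all
    · rintro ⟨s, hs, hrek⟩
      rw [rekurencja] at hrek
      simp only [hge, hd] at hrek
      by_cases hp : isPrime (s.1 * 10 + d) = true
      · simp [hp] at hrek
        rcases hrek with h1 | h2
        · exact ⟨(0, s.2 + 1), (mem_foldl_stepState _ _ _ _).mpr (Or.inr ⟨s, hs, Or.inl ⟨hp, rfl⟩⟩), h1⟩
        · exact ⟨(s.1 * 10 + d, s.2), (mem_foldl_stepState _ _ _ _).mpr (Or.inr ⟨s, hs, Or.inr rfl⟩), h2⟩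
      · simp [hp] at hrek
        exact ⟨(s.1 * 10 + d, s.2), (mem_foldl_stepState _ _ _ _).mpr (Or.inr ⟨s, hs, Or.inr rfl⟩), hrek⟩
termination_by ((T.length : Int) - indeks).toNat
decreasing_by omega

-- ===== VERDICT (by name: the statement is the Claim_ definition above) =====
theorem rekurencja_spec : Claim_equal_rekurencja := by
  intro T indeks current piecies _ hpre
  unfold Spec_rekurencja rekurencja_alt
  rw [main_inv T indeks hpre]
  simp [PySem.Set.ofList]
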